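-- pv_equiv track=rewrite | github.com/MrBrantCode/unitest_baseline | mut_generate/mist_train_cf/cf_73791/solution.py | check_sum_primes
-- ===== SOURCE A (Python) =====
-- def check_sum_primes(start, end):
--     def check_prime(n):
--         if n <= 1:
--             return False
--         if n <= 3:
--             return True
--         if n % 2 == 0 or n % 3 == 0:
--             return False
--         i = 5
--         while i * i <= n:
--             if n % i == 0 or n % (i + 2) == 0:
--                 return False
--             i += 6
--         return True
--
--     primes = []
--     for num in range(start, end + 1):
--         if check_prime(num):
--             digits_sum = sum([int(d) for d in str(num)])
--             if check_prime(digits_sum):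
--                 primes.append(num)
--     return primes
-- ===== SOURCE B (Python) =====
-- def check_sum_primes(start, end):
--     # Sieve of Eratosthenes over [0, end], then one linear scan; digit-sum
--     # primality checked by simple trial division (digit sums are tiny).
--     if end < 2:
--         return []
--     sieve = bytearray([1]) * (end + 1)
--     sieve[0] = 0
--     sieve[1] = 0
--     i = 2
--     while i * i <= end:
--         if sieve[i]:
--             for j in range(i * i, end + 1, i):
--                 sieve[j] = 0
--         i += 1
--
--     def is_prime_small(n):
--         if n < 2:
--             return False
--         d = 2
--         while d * d <= n:
--             if n % d == 0:
--                 return False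
--             d += 1
--         return True
--
--     result = []
--     for n in range(max(start, 2), end + 1):
--         if sieve[n] and is_prime_small(sum(int(c) for c in str(n))):
--             result.append(n)
--     return result
-- ===== Notes on version B (the rewrite author's own statement) =====
-- stated objective: faster
-- what changed: A tests every number in the range (and each digit sum) with per-number 6k±1 trial division; B builds a Sieve of Eratosthenes up to end once and filters the range by sieve lookup, keeping trial division only for the tiny digit sums.
import Mathlib
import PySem

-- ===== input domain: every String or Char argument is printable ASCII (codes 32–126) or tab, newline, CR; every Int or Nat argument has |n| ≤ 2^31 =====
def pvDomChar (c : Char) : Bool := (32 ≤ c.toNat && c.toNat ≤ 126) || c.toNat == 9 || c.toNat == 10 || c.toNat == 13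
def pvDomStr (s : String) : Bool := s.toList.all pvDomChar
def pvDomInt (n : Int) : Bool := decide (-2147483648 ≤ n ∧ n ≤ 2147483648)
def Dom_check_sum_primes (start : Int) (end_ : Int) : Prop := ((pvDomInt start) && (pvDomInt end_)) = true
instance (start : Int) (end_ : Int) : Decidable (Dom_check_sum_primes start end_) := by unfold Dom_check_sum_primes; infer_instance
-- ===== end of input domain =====

-- B replaces A's per-number 6k±1 trial division over the whole range by a Sieve of
-- Eratosthenes up to end (objective: faster); digit sums stay checked by trial division.

-- shared helper: sum(int(d) for d in str(num)) — both Pythons contain this exact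
-- expression; int(d) on a single digit char is its code minus 48 (exact: only reached
-- for num ≥ 2, whose str() consists of digit chars only)
def pyDigitSum (num : Int) : Int :=
  ((PySem.Int.toChars num).map (fun c => ((c.toNat : Int) - 48))).sum

-- ===== PORT A =====
-- while i * i <= n: … i += 6
def checkPrimeLoop (n : Int) (i : Int) : Bool :=
  if _h : i * i ≤ n then
    if PySem.Int.mod n i == 0 || PySem.Int.mod n (i + 2) == 0 then false
    else checkPrimeLoop n (i + 6)
  else true
termination_by (n + 7 - i).toNat
decreasing_by
  have hii : i ≤ i * i ∨ i ≤ 0 := by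
    by_cases h : i ≤ 0
    · exact Or.inr h
    · exact Or.inl (le_mul_of_one_le_left (by omega) (by omega))
  have h0 : 0 ≤ i * i := mul_self_nonneg i
  omega

def checkPrime (n : Int) : Bool :=
  if n ≤ 1 then false
  else if n ≤ 3 then true
  else if PySem.Int.mod n 2 == 0 || PySem.Int.mod n 3 == 0 then false
  else checkPrimeLoop n 5

def check_sum_primes (start : Int) (end_ : Int) : List Int :=
  (PySem.List.pyRange start (end_ + 1) 1).foldl
    (fun primes num =>
      if checkPrime num then
        if checkPrime (pyDigitSum num) then primes ++ [num] else primes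
      else primes) []

-- ===== PORT B =====
-- while d * d <= n: … d += 1
def isPrimeSmallLoop (n : Int) (d : Int) : Bool :=
  if _h : d * d ≤ n then
    if PySem.Int.mod n d == 0 then false
    else isPrimeSmallLoop n (d + 1)
  else true
termination_by (n + 2 - d).toNat
decreasing_by
  have hii : d ≤ d * d ∨ d ≤ 0 := by
    by_cases h : d ≤ 0
    · exact Or.inr h
    · exact Or.inl (le_mul_of_one_le_left (by omega) (by omega))
  have h0 : 0 ≤ d * d := mul_self_nonneg d
  omega

def isPrimeSmall (n : Int) : Bool :=
  if n < 2 then false else isPrimeSmallLoop n 2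

-- while i * i <= end: if sieve[i]: for j in range(i*i, end+1, i): sieve[j] = 0
-- (every index accessed is provably in range, so the total pyGetD/pySetD are exact)
def sieveLoop (end_ : Int) (i : Int) (s : List Bool) : List Bool :=
  if _h : i * i ≤ end_ then
    let s' := if PySem.List.pyGetD s i false then
        (PySem.List.pyRange (i * i) (end_ + 1) i).foldl
          (fun a j => PySem.List.pySetD a j false) s
      else s
    sieveLoop end_ (i + 1) s'
  else s
termination_by (end_ + 2 - i).toNat
decreasing_by
  have hii : i ≤ i * i ∨ i ≤ 0 := by
    by_cases h : i ≤ 0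
    · exact Or.inr h
    · exact Or.inl (le_mul_of_one_le_left (by omega) (by omega))
  have h0 : 0 ≤ i * i := mul_self_nonneg i
  omega

def check_sum_primes_alt (start : Int) (end_ : Int) : List Int :=
  if end_ < 2 then []
  else
    let s0 := PySem.List.pySetD
      (PySem.List.pySetD (PySem.List.pyRepeat [true] (end_ + 1)) 0 false) 1 false
    let s := sieveLoop end_ 2 s0
    (PySem.List.pyRange (max start 2) (end_ + 1) 1).foldl
      (fun result n =>
        if PySem.List.pyGetD s n false && isPrimeSmall (pyDigitSum n) then result ++ [n]
        else result) []

-- ===== PRECONDITION & SPEC =====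
def Spec_check_sum_primes (start : Int) (end_ : Int) (out : List Int) : Prop := out = check_sum_primes_alt start end_
instance (start : Int) (end_ : Int) (out : List Int) : Decidable (Spec_check_sum_primes start end_ out) := by unfold Spec_check_sum_primes; infer_instance

-- ===== CLAIM (what is proved, stated in full; the proofs are below) =====
def Claim_equal_check_sum_primes : Prop := ∀ (start : Int) (end_ : Int), Dom_check_sum_primes start end_ → Spec_check_sum_primes start end_ (check_sum_primes start end_)

-- ===== LEMMAS AND PROOFS =====

-- a proper divisor refutes primality
theorem pv_not_prime_of_divisor {n m : Int} (hn : 2 ≤ n) (h2 : 2 ≤ m) (hlt : m < n)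
    (hdvd : m ∣ n) : ¬ Nat.Prime n.toNat := by
  intro hp
  have hm : (m.toNat : Int) = m := Int.toNat_of_nonneg (by omega)
  have hnn : (n.toNat : Int) = n := Int.toNat_of_nonneg (by omega)
  have hdn : m.toNat ∣ n.toNat := by
    rw [← Int.natCast_dvd_natCast, hm, hnn]; exact hdvd
  rcases (Nat.Prime.eq_one_or_self_of_dvd hp _ hdn) with h | h <;> omega

-- no divisor d with d*d ≤ n ⇒ prime
theorem pv_prime_of_no_small_divisor {n : Int} (hn : 2 ≤ n)
    (H : ∀ m : Int, 2 ≤ m → m * m ≤ n → ¬ m ∣ n) : Nat.Prime n.toNat := by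
  by_contra hnp
  have h2 : 2 ≤ n.toNat := by omega
  have hp := Nat.minFac_prime (n := n.toNat) (by omega)
  have hdvd := Nat.minFac_dvd n.toNat
  have hsq : n.toNat.minFac * n.toNat.minFac ≤ n.toNat := by
    have := Nat.minFac_sq_le_self (by omega) hnp
    simpa [pow_two] using this
  refine H (n.toNat.minFac : Int) (by exact_mod_cast hp.two_le) ?_ ?_
  · have h1 : ((n.toNat.minFac * n.toNat.minFac : Nat) : Int) ≤ ((n.toNat : Nat) : Int) :=
      Int.ofNat_le.mpr hsq
    push_cast at h1
    rwa [Int.toNat_of_nonneg (show (0:Int) ≤ n by omega)] at h1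
  · have := Int.natCast_dvd_natCast.mpr hdvd
    simpa [Int.toNat_of_nonneg (show (0:Int) ≤ n by omega)] using this

theorem pv_primeI_iff (m : Int) :
    (2 ≤ m ∧ ∀ d : Int, 2 ≤ d → d ∣ m → ¬ d * d ≤ m) ↔ (2 ≤ m ∧ Nat.Prime m.toNat) := by
  constructor
  · rintro ⟨h2, H⟩
    exact ⟨h2, pv_prime_of_no_small_divisor h2 (fun d hd hsq hdvd => H d hd hdvd hsq)⟩
  · rintro ⟨h2, hp⟩
    refine ⟨h2, fun d hd hdvd hsq => ?_⟩
    have hdlt : d < m := by nlinarith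
    exact pv_not_prime_of_divisor h2 hd hdlt hdvd hp

theorem pv_small_loop (n d : Int) (hn : 2 ≤ n) (hd : 2 ≤ d)
    (hbelow : ∀ m : Int, 2 ≤ m → m < d → ¬ m ∣ n) :
    isPrimeSmallLoop n d = decide (Nat.Prime n.toNat) := by
  fun_induction isPrimeSmallLoop n d
  case case1 d hdd hm =>
    have hdvd : d ∣ n := (PySem.Int.mod_eq_zero_iff_dvd n d).mp (by simpa using hm)
    have hlt : d < n := by nlinarith
    have : ¬ Nat.Prime n.toNat := pv_not_prime_of_divisor hn hd hlt hdvd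
    simp [this]
  case case2 d hdd hm ih =>
    refine ih (by omega) ?_
    intro m h2 hlt
    by_cases hmd : m = d
    · subst hmd
      intro hdvd
      exact hm (by simpa using (PySem.Int.mod_eq_zero_iff_dvd n m).mpr hdvd)
    · exact hbelow m h2 (by omega)
  case case3 d hdd =>
    have hp : Nat.Prime n.toNat := by
      refine pv_prime_of_no_small_divisor hn ?_
      intro m h2 hsq hdvd
      have hmd : m < d := by nlinarith
      exact hbelow m h2 hmd hdvd
    simp [hp]

theorem pv_isPrimeSmall_eq (n : Int) :
    isPrimeSmall n = decide (2 ≤ n ∧ Nat.Prime n.toNat) := by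
  rw [isPrimeSmall]
  split_ifs with h
  · have : ¬ (2 ≤ n ∧ Nat.Prime n.toNat) := by rintro ⟨a, -⟩; omega
    simp [this]
  · rw [pv_small_loop n 2 (by omega) (by omega) (fun m h2 hlt => by omega)]
    simp [show (2:Int) ≤ n by omega]

theorem pv_wheel_loop (n i : Int) (hn : 5 ≤ n) (h2 : ¬ (2:Int) ∣ n) (h3 : ¬ (3:Int) ∣ n)
    (hi : 5 ≤ i) (hmod : i % 6 = 5)
    (hbelow : ∀ m : Int, 5 ≤ m → m < i → (m % 6 = 1 ∨ m % 6 = 5) → ¬ m ∣ n) :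
    checkPrimeLoop n i = decide (Nat.Prime n.toNat) := by
  fun_induction checkPrimeLoop n i
  case case1 i hii hm =>
    have hm' : PySem.Int.mod n i = 0 ∨ PySem.Int.mod n (i + 2) = 0 := by
      rcases Bool.or_eq_true_iff.mp hm with h | h
      · exact Or.inl (by simpa using h)
      · exact Or.inr (by simpa using h)
    have : ¬ Nat.Prime n.toNat := by
      rcases hm' with h | h
      · have hdvd : i ∣ n := (PySem.Int.mod_eq_zero_iff_dvd n i).mp h
        exact pv_not_prime_of_divisor (by omega) (by omega) (by nlinarith) hdvd
      · have hdvd : i + 2 ∣ n := (PySem.Int.mod_eq_zero_iff_dvd n (i + 2)).mp h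
        exact pv_not_prime_of_divisor (by omega) (by omega) (by nlinarith) hdvd
    simp [this]
  case case2 i hii hm ih =>
    have hnd : ¬ i ∣ n ∧ ¬ (i + 2) ∣ n := by
      rw [Bool.or_eq_true_iff] at hm
      push Not at hm
      constructor
      · intro hdvd
        exact hm.1 (by simpa using (PySem.Int.mod_eq_zero_iff_dvd n i).mpr hdvd)
      · intro hdvd
        exact hm.2 (by simpa using (PySem.Int.mod_eq_zero_iff_dvd n (i + 2)).mpr hdvd)
    refine ih (by omega) (by omega) ?_
    intro m h5 hlt hres
    by_cases hml : m < i
    · exact hbelow m h5 hml hres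
    · have : m = i ∨ m = i + 2 := by omega
      rcases this with rfl | rfl
      · exact hnd.1
      · exact hnd.2
  case case3 i hii =>
    have hp : Nat.Prime n.toNat := by
      refine pv_prime_of_no_small_divisor (by omega) ?_
      intro m hm2 hsq hdvd
      have hm6 : m % 6 = 0 ∨ m % 6 = 1 ∨ m % 6 = 2 ∨ m % 6 = 3 ∨ m % 6 = 4 ∨ m % 6 = 5 := by
        omega
      have hmlt : m < i := by nlinarith
      rcases hm6 with h | h | h | h | h | h
      · exact h2 (dvd_trans (by omega) hdvd)
      · exact hbelow m (by omega) hmlt (Or.inl h) hdvd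
      · exact h2 (dvd_trans (by omega) hdvd)
      · exact h3 (dvd_trans (by omega) hdvd)
      · exact h2 (dvd_trans (by omega) hdvd)
      · exact hbelow m (by omega) hmlt (Or.inr h) hdvd
    simp [hp]

theorem pv_checkPrime_eq (n : Int) :
    checkPrime n = decide (2 ≤ n ∧ Nat.Prime n.toNat) := by
  rw [checkPrime]
  split_ifs with h1 h2 h3
  · have : ¬ (2 ≤ n ∧ Nat.Prime n.toNat) := by rintro ⟨a, -⟩; omega
    simp [this]
  · have : n = 2 ∨ n = 3 := by omega
    rcases this with rfl | rfl <;> simp <;> decide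
  · have hm' : PySem.Int.mod n 2 = 0 ∨ PySem.Int.mod n 3 = 0 := by
      rcases Bool.or_eq_true_iff.mp h3 with h | h
      · exact Or.inl (by simpa using h)
      · exact Or.inr (by simpa using h)
    have : ¬ Nat.Prime n.toNat := by
      rcases hm' with h | h
      · exact pv_not_prime_of_divisor (by omega) (by omega) (by omega)
          ((PySem.Int.mod_eq_zero_iff_dvd n 2).mp h)
      · exact pv_not_prime_of_divisor (by omega) (by omega) (by omega)
          ((PySem.Int.mod_eq_zero_iff_dvd n 3).mp h)
    simp [this]
  · rw [Bool.or_eq_true_iff] at h3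
    push Not at h3
    have hn2 : ¬ (2:Int) ∣ n := fun hdvd =>
      h3.1 (by simpa using (PySem.Int.mod_eq_zero_iff_dvd n 2).mpr hdvd)
    have hn3 : ¬ (3:Int) ∣ n := fun hdvd =>
      h3.2 (by simpa using (PySem.Int.mod_eq_zero_iff_dvd n 3).mpr hdvd)
    have hn5 : 5 ≤ n := by
      rcases lt_or_ge n 5 with h | h
      · exfalso
        have : n = 4 := by omega
        exact hn2 (by omega)
      · exact h
    rw [pv_wheel_loop n 5 hn5 hn2 hn3 (by omega) (by decide) (fun m h5 hlt _ => by omega)]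
    simp [show (2:Int) ≤ n by omega]


theorem pv_getD_setD_self (s : List Bool) (m : Int) (hm : 0 ≤ m) :
    PySem.List.pyGetD (PySem.List.pySetD s m false) m false = false := by
  rw [PySem.List.pySetD_of_nonneg s false hm, PySem.List.pyGetD_of_nonneg _ _ hm]
  simp only [List.getD]
  by_cases h : m.toNat < s.length
  · rw [List.getElem?_set_self (by simpa using h)]; rfl
  · rw [List.getElem?_eq_none (by simp; omega)]; rfl

theorem pv_getD_setD_ne (s : List Bool) (j m : Int) (d : Bool) (hj : 0 ≤ j) (hm : 0 ≤ m)
    (hne : m ≠ j) :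
    PySem.List.pyGetD (PySem.List.pySetD s j false) m d = PySem.List.pyGetD s m d := by
  rw [PySem.List.pySetD_of_nonneg s false hj, PySem.List.pyGetD_of_nonneg _ _ hm,
    PySem.List.pyGetD_of_nonneg _ _ hm]
  simp only [List.getD]
  rw [List.getElem?_set_ne (by omega)]

theorem pv_foldl_set_getD (js : List Int) (s : List Bool) (m : Int)
    (hjs : ∀ j ∈ js, 0 ≤ j) (hm : 0 ≤ m) :
    PySem.List.pyGetD (js.foldl (fun a j => PySem.List.pySetD a j false) s) m false
      = if m ∈ js then false else PySem.List.pyGetD s m false := by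
  induction js generalizing s with
  | nil => simp
  | cons j js ih =>
    simp only [List.foldl_cons]
    rw [ih _ (fun x hx => hjs x (List.mem_cons_of_mem _ hx))]
    by_cases hmem : m ∈ js
    · simp [hmem]
    · by_cases hmj : m = j
      · subst hmj
        simp [hmem, List.mem_cons, pv_getD_setD_self s m hm]
      · rw [pv_getD_setD_ne s j m false (hjs j (List.mem_cons_self)) hm hmj]
        simp [hmem, List.mem_cons, hmj]

theorem pv_foldl_set_length (js : List Int) (s : List Bool) :
    (js.foldl (fun a j => PySem.List.pySetD a j false) s).length = s.length := by
  induction js generalizing s with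
  | nil => rfl
  | cons j js ih => simp [List.foldl_cons, ih, PySem.List.length_pySetD]

def SieveGood (end_ i : Int) (s : List Bool) : Prop :=
  s.length = (end_ + 1).toNat ∧
  ∀ m : Int, 0 ≤ m → m ≤ end_ →
    (PySem.List.pyGetD s m false = true ↔
      (2 ≤ m ∧ ∀ d : Int, 2 ≤ d → d < i → d ∣ m → ¬ d * d ≤ m))

theorem pv_sieve_step (end_ i : Int) (s : List Bool) (hi : 2 ≤ i) (hii : i * i ≤ end_)
    (hg : SieveGood end_ i s) :
    SieveGood end_ (i + 1)
      (if PySem.List.pyGetD s i false then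
        (PySem.List.pyRange (i * i) (end_ + 1) i).foldl
          (fun a j => PySem.List.pySetD a j false) s
      else s) := by
  have hiE : i ≤ end_ := by nlinarith
  split_ifs with hgi
  · -- i survives: mark its multiples from i*i on
    constructor
    · rw [pv_foldl_set_length]; exact hg.1
    · intro m hm0 hmE
      have hjs : ∀ j ∈ PySem.List.pyRange (i * i) (end_ + 1) i, 0 ≤ j := by
        intro j hj
        have := (PySem.List.mem_pyRange_iff_of_pos (by omega) j).mp hj
        nlinarith [this.1]
      rw [pv_foldl_set_getD _ _ _ hjs hm0]
      have hmemIff : m ∈ PySem.List.pyRange (i * i) (end_ + 1) i ↔ (i * i ≤ m ∧ i ∣ m) := by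
        rw [PySem.List.mem_pyRange_iff_of_pos (by omega)]
        constructor
        · rintro ⟨ha, -, hc⟩
          refine ⟨ha, ?_⟩
          have := dvd_add hc (dvd_mul_right i i)
          simpa using this
        · rintro ⟨ha, hc⟩
          exact ⟨ha, by omega, dvd_sub hc (dvd_mul_right i i)⟩
      by_cases hmem : m ∈ PySem.List.pyRange (i * i) (end_ + 1) i
      · rw [if_pos hmem]
        have hm' := hmemIff.mp hmem
        constructor
        · intro h; exact absurd h (by simp)
        · rintro ⟨h2m, H⟩
          exact absurd hm'.1 (H i hi (by omega) hm'.2)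
      · rw [if_neg hmem, hg.2 m hm0 hmE]
        constructor
        · rintro ⟨h2m, H⟩
          refine ⟨h2m, fun d hd hdi hdvd hsq => ?_⟩
          rcases lt_or_eq_of_le (by omega : d ≤ i) with h | h
          · exact H d hd h hdvd hsq
          · subst h
            exact hmem (hmemIff.mpr ⟨hsq, hdvd⟩)
        · rintro ⟨h2m, H⟩
          exact ⟨h2m, fun d hd hdi hdvd hsq => H d hd (by omega) hdvd hsq⟩
  · -- i already marked: i is composite, its multiples are already covered
    have hnot : ¬ (2 ≤ i ∧ ∀ d : Int, 2 ≤ d → d < i → d ∣ i → ¬ d * d ≤ i) := by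
      intro h
      exact hgi ((hg.2 i (by omega) hiE).mpr h)
    push Not at hnot
    obtain ⟨d, hd2, hdi, hdvd, hsq⟩ := hnot hi
    constructor
    · exact hg.1
    · intro m hm0 hmE
      rw [hg.2 m hm0 hmE]
      constructor
      · rintro ⟨h2m, H⟩
        refine ⟨h2m, fun e he hei hedvd hesq => ?_⟩
        rcases lt_or_eq_of_le (by omega : e ≤ i) with h | h
        · exact H e he h hedvd hesq
        · subst h
          have hdm : d ∣ m := dvd_trans hdvd hedvd
          have : d * d ≤ m := by nlinarith
          exact H d hd2 hdi hdm this
      · rintro ⟨h2m, H⟩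
        exact ⟨h2m, fun e he hei hedvd hesq => H e he (by omega) hedvd hesq⟩

theorem pv_sieveLoop_good (end_ i : Int) (s : List Bool) (hi : 2 ≤ i)
    (hg : SieveGood end_ i s) :
    ∀ m : Int, 0 ≤ m → m ≤ end_ →
      (PySem.List.pyGetD (sieveLoop end_ i s) m false = true
        ↔ (2 ≤ m ∧ Nat.Prime m.toNat)) := by
  fun_induction sieveLoop end_ i s
  case case1 s hii s' ih =>
    rename_i i
    refine ih (by omega) ?_
    show SieveGood end_ (i + 1)
      (if _h : PySem.List.pyGetD s i false = true then
        (PySem.List.pyRange (i * i) (end_ + 1) i).foldl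
          (fun a j => PySem.List.pySetD a j false) s
      else s)
    rw [dite_eq_ite]
    exact pv_sieve_step end_ i s hi hii hg
  case case2 i s hii =>
    intro m hm0 hmE
    rw [hg.2 m hm0 hmE]
    have hcond : (∀ d : Int, 2 ≤ d → d < i → d ∣ m → ¬ d * d ≤ m)
        ↔ (∀ d : Int, 2 ≤ d → d ∣ m → ¬ d * d ≤ m) := by
      constructor
      · intro H d hd hdvd hsq
        have hdi : d < i := by nlinarith
        exact H d hd hdi hdvd hsq
      · intro H d hd _ hdvd hsq
        exact H d hd hdvd hsq
    rw [and_congr_right (fun _ => hcond)]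
    exact pv_primeI_iff m

theorem pv_s0_good (end_ : Int) (hE : 2 ≤ end_) :
    SieveGood end_ 2
      (PySem.List.pySetD
        (PySem.List.pySetD (PySem.List.pyRepeat [true] (end_ + 1)) 0 false) 1 false) := by
  rw [PySem.List.pyRepeat_singleton]
  constructor
  · simp [PySem.List.length_pySetD]
  · intro m hm0 hmE
    by_cases h0 : m = 0
    · subst h0
      rw [pv_getD_setD_ne _ 1 0 false (by omega) (by omega) (by omega),
        pv_getD_setD_self _ 0 (by omega)]
      simp
    · by_cases h1 : m = 1
      · subst h1
        rw [pv_getD_setD_self _ 1 (by omega)]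
        constructor
        · simp
        · rintro ⟨h, -⟩; omega
      · rw [pv_getD_setD_ne _ 1 m false (by omega) hm0 (by omega),
          pv_getD_setD_ne _ 0 m false (by omega) hm0 (by omega),
          PySem.List.pyGetD_of_nonneg _ _ hm0,
          List.getD_replicate _ (by omega)]
        constructor
        · intro _
          exact ⟨by omega, fun d hd hdi => by omega⟩
        · intro _; rfl

-- ===== VERDICT (by name: the statement is the Claim_ definition above) =====
theorem check_sum_primes_spec : Claim_equal_check_sum_primes := by
  intro start end_ _
  unfold Spec_check_sum_primes
  rw [check_sum_primes, check_sum_primes_alt]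
  have hA : (PySem.List.pyRange start (end_ + 1) 1).foldl
      (fun primes num =>
        if checkPrime num then
          if checkPrime (pyDigitSum num) then primes ++ [num] else primes
        else primes) []
      = (PySem.List.pyRange start (end_ + 1) 1).filter
          (fun num => checkPrime num && checkPrime (pyDigitSum num)) := by
    rw [PySem.List.foldl_congr_mem _ _
      (fun primes num =>
        if checkPrime num && checkPrime (pyDigitSum num) then primes ++ [num] else primes) _
      (by
        intro acc x _
        cases hcp : checkPrime x <;> cases h2 : checkPrime (pyDigitSum x) <;> simp [hcp, h2])]
    simpa using PySem.List.foldl_append_if_eq_filter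
      (fun num => checkPrime num && checkPrime (pyDigitSum num))
      (PySem.List.pyRange start (end_ + 1) 1) []
  rw [hA]
  split_ifs with hE
  · -- end < 2: the whole range is below 2, nothing is prime
    rw [List.filter_eq_nil_iff]
    intro x hx
    have := PySem.List.mem_pyRange_one.mp hx
    rw [pv_checkPrime_eq]
    simp only [Bool.and_eq_true, decide_eq_true_eq]
    rintro ⟨⟨h2x, -⟩, -⟩
    omega
  · rw [PySem.List.foldl_append_if_eq_filter, List.nil_append]
    have hgood := pv_sieveLoop_good end_ 2 _ (le_refl 2) (pv_s0_good end_ (by omega))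
    have hpred : ∀ x : Int, 2 ≤ x → x < end_ + 1 →
        (checkPrime x && checkPrime (pyDigitSum x))
          = (PySem.List.pyGetD (sieveLoop end_ 2
              (PySem.List.pySetD
                (PySem.List.pySetD (PySem.List.pyRepeat [true] (end_ + 1)) 0 false) 1 false))
              x false && isPrimeSmall (pyDigitSum x)) := by
      intro x h2x hxE
      have hs : PySem.List.pyGetD (sieveLoop end_ 2
          (PySem.List.pySetD
            (PySem.List.pySetD (PySem.List.pyRepeat [true] (end_ + 1)) 0 false) 1 false))
          x false = decide (2 ≤ x ∧ Nat.Prime x.toNat) := by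
        have := hgood x (by omega) (by omega)
        rw [Bool.eq_iff_iff]
        simpa using this
      rw [pv_checkPrime_eq, pv_checkPrime_eq, pv_isPrimeSmall_eq, hs]
    rcases lt_or_ge (end_ + 1) start with hlt | hge
    · rw [PySem.List.pyRange_one_eq_nil (by omega),
        PySem.List.pyRange_one_eq_nil (by omega : end_ + 1 ≤ max start 2)]
      rfl
    · rw [PySem.List.pyRange_one_append start (max start 2) (end_ + 1)
        (le_max_left start 2) (by omega), List.filter_append]
      have hlow : (PySem.List.pyRange start (max start 2) 1).filter
          (fun num => checkPrime num && checkPrime (pyDigitSum num)) = [] := by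
        rw [List.filter_eq_nil_iff]
        intro x hx
        have := PySem.List.mem_pyRange_one.mp hx
        rw [pv_checkPrime_eq]
        simp only [Bool.and_eq_true, decide_eq_true_eq]
        rintro ⟨⟨h2x, -⟩, -⟩
        omega
      rw [hlow, List.nil_append]
      refine List.filter_congr ?_
      intro x hx
      have := PySem.List.mem_pyRange_one.mp hx
      exact hpred x (by omega) (by omega)
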